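-- pv_equiv track=rewrite | github.com/Silvrash/othello-alpha-beta-pruning | Othello/BitboardOthelloPosition.py | _get_flips_direction
-- ===== SOURCE A (Python) =====
-- def _get_flips_direction(bit_pos, shift, mask, my_pieces, opp_pieces):
--     """
--     Calculate pieces to flip in a specific direction using bitboard operations.
--
--     This function implements the core Othello flipping logic using advanced bitboard
--     techniques. Instead of walking through squares one by one, we use bit shifts
--     to process entire lines of pieces simultaneously.
--
--     The algorithm uses a technique called "direction ray casting" where we:
--     1. Cast a ray from the placed piece in the given direction
--     2. Collect all opponent pieces in that ray
--     3. Check if the ray ends with our own piece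
--     4. If yes, return all opponent pieces for flipping
--
--     Args:
--         bit_pos (int): Bit position of the placed piece
--         shift (int): Direction shift amount
--         mask (int): Edge mask to prevent wraparound
--         my_pieces (int): Current player's pieces bitboard
--         opp_pieces (int): Opponent's pieces bitboard
--
--     Returns:
--         int: Bitboard of pieces to flip in this direction
--     """
--     # Start ray casting from the placed piece
--     if shift > 0:
--         current = (1 << bit_pos) << shift  # Shift towards higher bit positions
--     else:
--         current = (1 << bit_pos) >> (-shift)  # Shift towards lower bit positions
--
--     current &= mask  # Apply edge mask to prevent board wraparound
--
--     # Collect opponent pieces in a continuous line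
--     opponent_run = 0  # Bitboard to accumulate opponent pieces
--
--     # Walk through opponent pieces in the ray direction
--     # This loop implements the "sliding window" technique for bitboards
--     while current and (current & opp_pieces):
--         opponent_run |= current  # Add this opponent piece to our collection
--
--         # Continue ray in the same direction
--         if shift > 0:
--             current = (current << shift) & mask
--         else:
--             current = (current >> (-shift)) & mask
--
--     # Check if ray ends with our own piece (valid capture)
--     # If the ray ends with our piece, we can flip all collected opponent pieces
--     if current and (current & my_pieces):
--         return opponent_run  # Return all opponent pieces for flipping
--
--     return 0  # No valid capture in this direction
-- ===== SOURCE B (Python) =====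
-- def _get_flips_direction(bit_pos, shift, mask, my_pieces, opp_pieces):
--     def step(c):
--         return ((c << shift) if shift > 0 else (c >> -shift)) & mask
--
--     def go(c):
--         # Decide success at the terminal square; OR the flips together on the way back.
--         if not (c & opp_pieces):
--             return 0 if (c & my_pieces) else None
--         rest = go(step(c))
--         return None if rest is None else rest | c
--
--     r = go(step(1 << bit_pos))
--     return 0 if r is None else r
-- ===== Notes on version B (the rewrite author's own statement) =====
-- stated objective: alternative
-- what changed: Replaces A's while-loop that accumulates opponent pieces forward and then tests the terminal square by a recursive ray walk (with an Option result) that decides success at the terminal square and ORs the flips together back-to-front, with no accumulator.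
-- outside the precondition, e.g. on _get_flips_direction(0, 1, -1, 0, -4): A returns 0, B returns 0
import Mathlib
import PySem

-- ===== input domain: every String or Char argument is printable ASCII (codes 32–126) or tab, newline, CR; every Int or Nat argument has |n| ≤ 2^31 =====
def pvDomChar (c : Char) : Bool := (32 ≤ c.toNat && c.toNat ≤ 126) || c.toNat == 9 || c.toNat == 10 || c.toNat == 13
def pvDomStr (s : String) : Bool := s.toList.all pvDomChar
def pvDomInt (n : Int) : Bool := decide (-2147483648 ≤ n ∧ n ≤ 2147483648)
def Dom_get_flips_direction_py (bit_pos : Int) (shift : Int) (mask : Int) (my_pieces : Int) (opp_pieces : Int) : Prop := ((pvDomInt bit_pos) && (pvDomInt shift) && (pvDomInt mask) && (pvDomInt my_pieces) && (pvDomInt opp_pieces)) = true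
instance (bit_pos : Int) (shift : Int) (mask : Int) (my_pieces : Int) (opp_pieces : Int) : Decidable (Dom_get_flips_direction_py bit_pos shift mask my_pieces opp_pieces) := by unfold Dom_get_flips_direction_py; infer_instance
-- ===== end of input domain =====

-- B replaces A's forward-accumulating while-loop by a recursive ray walk that decides success at the
-- terminal square and ORs the flipped pieces together back-to-front (objective: alternative; same cost).

-- ===== PORT A =====
-- A's while-loop; the Nat argument is fuel making the recursion total (under Pre_ it never runs out).
def pvLoopA (shift : Int) (mask : Int) (opp_pieces : Int) : Nat → Int → Int → Int × Int
  | 0, opponent_run, current => (opponent_run, current)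
  | fuel+1, opponent_run, current =>
    if current ≠ 0 ∧ PySem.Int.band current opp_pieces ≠ 0 then
      pvLoopA shift mask opp_pieces fuel (PySem.Int.bor opponent_run current)
        (if 0 < shift then PySem.Int.band (current <<< shift.toNat) mask
         else PySem.Int.band (current >>> (-shift).toNat) mask)
    else (opponent_run, current)

def get_flips_direction_py (bit_pos : Int) (shift : Int) (mask : Int) (my_pieces : Int) (opp_pieces : Int) : Int :=
  let current0 : Int :=
    if 0 < shift then ((1 : Int) <<< bit_pos.toNat) <<< shift.toNat
    else ((1 : Int) <<< bit_pos.toNat) >>> (-shift).toNat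
  let current1 := PySem.Int.band current0 mask
  let p := pvLoopA shift mask opp_pieces (bit_pos.natAbs + 70) 0 current1
  if p.2 ≠ 0 ∧ PySem.Int.band p.2 my_pieces ≠ 0 then p.1 else 0

-- ===== PORT B =====
def pvStep (shift : Int) (mask : Int) (c : Int) : Int :=
  PySem.Int.band (if 0 < shift then c <<< shift.toNat else c >>> (-shift).toNat) mask

-- Source B's recursive `go`; the Nat argument is fuel making the recursion total (under Pre_ it never runs out).
def pvGo (shift : Int) (mask : Int) (my_pieces : Int) (opp_pieces : Int) : Nat → Int → Option Int
  | 0, c => if PySem.Int.band c my_pieces ≠ 0 then some 0 else none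
  | fuel+1, c =>
    if PySem.Int.band c opp_pieces = 0 then
      (if PySem.Int.band c my_pieces ≠ 0 then some 0 else none)
    else
      (pvGo shift mask my_pieces opp_pieces fuel (pvStep shift mask c)).map
        (fun rest => PySem.Int.bor rest c)

def get_flips_direction_py_alt (bit_pos : Int) (shift : Int) (mask : Int) (my_pieces : Int) (opp_pieces : Int) : Int :=
  match pvGo shift mask my_pieces opp_pieces (bit_pos.natAbs + 70)
      (pvStep shift mask ((1 : Int) <<< bit_pos.toNat)) with
  | some r => r
  | none => 0

-- ===== PRECONDITION & SPEC =====
-- Pre_ excludes inputs where Python A raises ValueError (negative bit_pos) or loops forever: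
-- shift = 0 with the shifted bit on an opponent piece (the ray never advances), and shift > 0 with
-- both mask and opp_pieces negative (infinite two's-complement ones let the ray run forever); in the
-- latter region A does return on some inputs (when the ray misses the opponent bits) — see cites.
def Pre_get_flips_direction_py (bit_pos : Int) (shift : Int) (mask : Int) (my_pieces : Int) (opp_pieces : Int) : Prop :=
  0 ≤ bit_pos ∧
  (shift = 0 → PySem.Int.band (PySem.Int.band ((1 : Int) <<< bit_pos.toNat) mask) opp_pieces = 0) ∧
  (0 < shift → 0 ≤ mask ∨ 0 ≤ opp_pieces)
instance (bit_pos : Int) (shift : Int) (mask : Int) (my_pieces : Int) (opp_pieces : Int) : Decidable (Pre_get_flips_direction_py bit_pos shift mask my_pieces opp_pieces) := by unfold Pre_get_flips_direction_py; infer_instance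

def pvWitness_get_flips_direction_py : Int × Int × Int × Int × Int := (2, 1, 255, 16, 12)

def Spec_get_flips_direction_py (bit_pos : Int) (shift : Int) (mask : Int) (my_pieces : Int) (opp_pieces : Int) (out : Int) : Prop := out = get_flips_direction_py_alt bit_pos shift mask my_pieces opp_pieces
instance (bit_pos : Int) (shift : Int) (mask : Int) (my_pieces : Int) (opp_pieces : Int) (out : Int) : Decidable (Spec_get_flips_direction_py bit_pos shift mask my_pieces opp_pieces out) := by unfold Spec_get_flips_direction_py; infer_instance

-- ===== CLAIM (what is proved, stated in full; the proofs are below) =====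
def Claim_equal_get_flips_direction_py : Prop := ∀ (bit_pos : Int) (shift : Int) (mask : Int) (my_pieces : Int) (opp_pieces : Int), Dom_get_flips_direction_py bit_pos shift mask my_pieces opp_pieces → Pre_get_flips_direction_py bit_pos shift mask my_pieces opp_pieces → Spec_get_flips_direction_py bit_pos shift mask my_pieces opp_pieces (get_flips_direction_py bit_pos shift mask my_pieces opp_pieces)

-- ===== LEMMAS AND PROOFS =====

theorem pv_zero_band (a : Int) : PySem.Int.band 0 a = 0 := by
  rw [PySem.Int.band_comm]; simp

-- n = (n &&& m) + (n \ m): the masked part and the difference partition n.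
theorem pv_land_add_ldiff (n : Nat) : ∀ m : Nat, (n &&& m) + n.ldiff m = n := by
  induction n using Nat.binaryRec with
  | zero => intro m; simp [Nat.ldiff]
  | bit b n ih =>
    intro m
    rw [← Nat.bit_testBit_zero_shiftRight_one m, Nat.land_bit, Nat.ldiff_bit]
    have hrec := ih (m >>> 1)
    cases b <;> cases hb : m.testBit 0 <;>
      simp only [Nat.bit, Bool.and_true, Bool.and_false, Bool.not_true, Bool.not_false,
        Bool.true_and, Bool.false_and, cond_true, cond_false] <;> omega

theorem pv_sub_land (n m : Nat) : n - (n &&& m) = n.ldiff m := by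
  have := pv_land_add_ldiff n m
  omega

-- PySem's Python-exact `|` agrees with Mathlib's Int.lor.
theorem pv_bor_eq_lor (a b : Int) : PySem.Int.bor a b = Int.lor a b := by
  unfold PySem.Int.bor
  cases a with
  | ofNat m =>
    cases b with
    | ofNat n => simp [Int.lor]
    | negSucc n =>
      have h1 : ¬ (0 : Int) ≤ Int.negSucc n := by omega
      have h2 : (-(Int.negSucc n) - 1).toNat = n := by
        rw [Int.negSucc_eq]; omega
      simp only [Int.natCast_nonneg, if_false, h1, h2]
      rw [pv_sub_land]
      simp [Int.lor, Int.negSucc_eq]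
      ring
  | negSucc m =>
    have h1 : ¬ (0 : Int) ≤ Int.negSucc m := by omega
    have h2 : (-(Int.negSucc m) - 1).toNat = m := by
      rw [Int.negSucc_eq]; omega
    cases b with
    | ofNat n =>
      simp only [h1, if_false, Int.natCast_nonneg, h2]
      rw [pv_sub_land]
      simp [Int.lor, Int.negSucc_eq]
      ring
    | negSucc n =>
      have h3 : ¬ (0 : Int) ≤ Int.negSucc n := by omega
      have h4 : (-(Int.negSucc n) - 1).toNat = n := by
        rw [Int.negSucc_eq]; omega
      simp only [h1, h3, if_false, h2, h4]
      simp [Int.lor, Int.negSucc_eq]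
      ring

theorem pv_mlor_assoc (a b c : Int) : Int.lor (Int.lor a b) c = Int.lor a (Int.lor b c) := by
  cases a <;> cases b <;> cases c <;>
    simp only [Int.lor] <;>
    (congr 1
     · apply Nat.eq_of_testBit_eq
       intro k
       simp only [Nat.testBit_lor, Nat.testBit_land, Nat.testBit_ldiff]
       rename_i x y z
       cases x.testBit k <;> cases y.testBit k <;> cases z.testBit k <;> rfl)

theorem pv_bor_assoc (a b c : Int) :
    PySem.Int.bor (PySem.Int.bor a b) c = PySem.Int.bor a (PySem.Int.bor b c) := by
  simp only [pv_bor_eq_lor, pv_mlor_assoc]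

theorem pv_acc_rot (run c r : Int) :
    PySem.Int.bor (PySem.Int.bor run c) r = PySem.Int.bor run (PySem.Int.bor r c) := by
  rw [pv_bor_assoc, PySem.Int.bor_comm c r]

-- the bridge: A's loop followed by its terminal test = B's recursion with the accumulator ORed in front
theorem pv_key (shift mask my_pieces opp_pieces : Int) : ∀ (fuel : Nat) (run c : Int),
    (if (pvLoopA shift mask opp_pieces fuel run c).2 ≠ 0 ∧
        PySem.Int.band (pvLoopA shift mask opp_pieces fuel run c).2 my_pieces ≠ 0 then
       (pvLoopA shift mask opp_pieces fuel run c).1 else 0)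
    = (match pvGo shift mask my_pieces opp_pieces fuel c with
       | some r => PySem.Int.bor run r
       | none => 0) := by
  intro fuel
  induction fuel with
  | zero =>
    intro run c
    simp only [pvLoopA, pvGo]
    by_cases hm : PySem.Int.band c my_pieces ≠ 0
    · have hc : c ≠ 0 := by
        intro h; rw [h, pv_zero_band] at hm; exact hm rfl
      simp [hm, hc]
    · simp [hm]
  | succ fuel ih =>
    intro run c
    by_cases hop : PySem.Int.band c opp_pieces = 0
    · have : ¬ (c ≠ 0 ∧ PySem.Int.band c opp_pieces ≠ 0) := by
        intro h; exact h.2 hop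
      simp only [pvLoopA, pvGo, if_neg this, if_pos hop]
      by_cases hm : PySem.Int.band c my_pieces ≠ 0
      · have hc : c ≠ 0 := by
          intro h; rw [h, pv_zero_band] at hm; exact hm rfl
        simp [hm, hc]
      · simp [hm]
    · have hc : c ≠ 0 := by
        intro h; rw [h, pv_zero_band] at hop; exact hop rfl
      have hcond : (c ≠ 0 ∧ PySem.Int.band c opp_pieces ≠ 0) := ⟨hc, hop⟩
      simp only [pvLoopA, pvGo, if_pos hcond, if_neg hop]
      rw [show (if 0 < shift then PySem.Int.band (c <<< shift.toNat) mask
               else PySem.Int.band (c >>> (-shift).toNat) mask) = pvStep shift mask c by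
            unfold pvStep; split_ifs <;> rfl]
      rw [ih (PySem.Int.bor run c) (pvStep shift mask c)]
      cases pvGo shift mask my_pieces opp_pieces fuel (pvStep shift mask c) with
      | none => rfl
      | some r => simp [pv_acc_rot]

-- ===== VERDICT (by name: the statement is the Claim_ definition above) =====
theorem get_flips_direction_py_spec : Claim_equal_get_flips_direction_py := by
  intro bit_pos shift mask my_pieces opp_pieces _ _
  unfold Spec_get_flips_direction_py get_flips_direction_py_alt
  have hred : get_flips_direction_py bit_pos shift mask my_pieces opp_pieces =
      (if (pvLoopA shift mask opp_pieces (bit_pos.natAbs + 70) 0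
             (pvStep shift mask ((1 : Int) <<< bit_pos.toNat))).2 ≠ 0 ∧
          PySem.Int.band
            (pvLoopA shift mask opp_pieces (bit_pos.natAbs + 70) 0
               (pvStep shift mask ((1 : Int) <<< bit_pos.toNat))).2 my_pieces ≠ 0 then
        (pvLoopA shift mask opp_pieces (bit_pos.natAbs + 70) 0
           (pvStep shift mask ((1 : Int) <<< bit_pos.toNat))).1
      else 0) := rfl
  rw [hred]
  rw [pv_key shift mask my_pieces opp_pieces (bit_pos.natAbs + 70) 0
      (pvStep shift mask ((1 : Int) <<< bit_pos.toNat))]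
  cases pvGo shift mask my_pieces opp_pieces (bit_pos.natAbs + 70)
      (pvStep shift mask ((1 : Int) <<< bit_pos.toNat)) with
  | none => rfl
  | some r =>
    show PySem.Int.bor 0 r = r
    rw [PySem.Int.bor_comm]; simp
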